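-- pv_equiv track=rewrite | github.com/aam-berg/allelic_analyses | scripts/old/04_proseq/split_by_allele.py | classify_read
-- ===== SOURCE A (Python) =====
-- def classify_read(allele_hits):
--     """
--     Classify a read based on its allele assignments at overlapping SNPs.
--
--     Rules:
--       - If no SNPs overlap: 'nosnp'
--       - If all SNP alleles are 'ref': 'ref'
--       - If all SNP alleles are 'alt': 'alt'
--       - If mix of 'ref' and 'alt': 'ambiguous' (possible recombination or error)
--       - If any 'other' and rest are consistent: use the consistent allele
--       - If only 'other': 'ambiguous'
--
--     Returns:
--         str: 'ref', 'alt', 'nosnp', or 'ambiguous'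
--     """
--     if not allele_hits:
--         return 'nosnp'
--
--     assignments = [h[4] for h in allele_hits]
--
--     # Filter out 'other' (sequencing errors)
--     informative = [a for a in assignments if a in ('ref', 'alt')]
--
--     if not informative:
--         return 'ambiguous'
--
--     unique_alleles = set(informative)
--
--     if len(unique_alleles) == 1:
--         return informative[0]
--     else:
--         # Mix of ref and alt at different SNPs — this read is ambiguous
--         # (could be sequencing error, or very rarely, recombination within read)
--         return 'ambiguous'
-- ===== SOURCE B (Python) =====
-- def classify_read(allele_hits):
--     """Recursive state machine: carry the first informative allele seen (or None)
--     and return 'ambiguous' immediately on the first conflicting informative allele."""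
--     if not allele_hits:
--         return 'nosnp'
--
--     def go(hits, current):
--         if not hits:
--             return current if current is not None else 'ambiguous'
--         a = hits[0][4]
--         if a in ('ref', 'alt'):
--             if current is None:
--                 return go(hits[1:], a)
--             if a != current:
--                 return 'ambiguous'
--         return go(hits[1:], current)
--
--     return go(allele_hits, None)
-- ===== Notes on version B (the rewrite author's own statement) =====
-- stated objective: alternative
-- what changed: Replaced A's staged collection pipeline (project assignments list, filter informative, build a set, test its size) with a recursive state machine that carries the first informative allele seen and terminates early with 'ambiguous' at the first conflicting informative allele.
import Mathlib
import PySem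

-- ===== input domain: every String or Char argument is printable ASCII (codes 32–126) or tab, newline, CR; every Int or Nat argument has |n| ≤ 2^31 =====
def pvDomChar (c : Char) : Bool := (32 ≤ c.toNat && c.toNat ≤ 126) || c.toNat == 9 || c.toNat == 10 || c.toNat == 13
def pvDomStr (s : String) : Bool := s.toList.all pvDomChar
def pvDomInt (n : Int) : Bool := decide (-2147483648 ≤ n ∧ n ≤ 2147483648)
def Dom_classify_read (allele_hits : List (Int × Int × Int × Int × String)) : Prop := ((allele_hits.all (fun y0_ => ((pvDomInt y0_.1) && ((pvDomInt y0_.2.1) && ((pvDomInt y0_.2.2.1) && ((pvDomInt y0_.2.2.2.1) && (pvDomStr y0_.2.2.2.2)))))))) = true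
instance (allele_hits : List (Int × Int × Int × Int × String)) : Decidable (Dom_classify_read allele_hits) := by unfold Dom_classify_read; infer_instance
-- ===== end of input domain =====

-- B replaces A's staged collection pipeline (assignments list, informative filter, unique set)
-- with a recursive state machine carrying the first informative allele and stopping early on conflict; objective: alternative.

-- ===== PORT A =====
def classify_read (allele_hits : List (Int × Int × Int × Int × String)) : String :=
  if allele_hits = [] then "nosnp"
  else
    let assignments := allele_hits.map (fun h => h.2.2.2.2)
    let informative := assignments.filter (fun a => a == "ref" || a == "alt")
    if informative = [] then "ambiguous"
    else
      let unique_alleles := PySem.Set.ofList informative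
      if unique_alleles.length == 1 then informative.headD ""
      else "ambiguous"

-- ===== PORT B =====
-- inner recursive helper `go` of Source B, step for step
def pvGo : List (Int × Int × Int × Int × String) → Option String → String
  | [], cur => cur.getD "ambiguous"
  | h :: t, cur =>
    let a := h.2.2.2.2
    if a == "ref" || a == "alt" then
      match cur with
      | none => pvGo t (some a)
      | some c => if a ≠ c then "ambiguous" else pvGo t (some c)
    else pvGo t cur

def classify_read_alt (allele_hits : List (Int × Int × Int × Int × String)) : String :=
  if allele_hits = [] then "nosnp" else pvGo allele_hits none

-- ===== PRECONDITION & SPEC =====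
def Spec_classify_read (allele_hits : List (Int × Int × Int × Int × String)) (out : String) : Prop := out = classify_read_alt allele_hits
instance (allele_hits : List (Int × Int × Int × Int × String)) (out : String) : Decidable (Spec_classify_read allele_hits out) := by unfold Spec_classify_read; infer_instance

-- ===== CLAIM (what is proved, stated in full; the proofs are below) =====
def Claim_equal_classify_read : Prop := ∀ (allele_hits : List (Int × Int × Int × Int × String)), Dom_classify_read allele_hits → Spec_classify_read allele_hits (classify_read allele_hits)

-- ===== LEMMAS AND PROOFS =====

lemma pv_go_some_ref (l : List (Int × Int × Int × Int × String)) :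
    pvGo l (some "ref")
      = if l.any (fun h => h.2.2.2.2 == "alt") then "ambiguous" else "ref" := by
  induction l with
  | nil => simp [pvGo]
  | cons h t ih =>
    by_cases hr : h.2.2.2.2 = "ref"
    · simp [pvGo, hr, ih]
      by_cases hA : (t.any fun h => h.2.2.2.2 == "alt") = true <;> simp_all
    · by_cases ha : h.2.2.2.2 = "alt"
      · simp [pvGo, ha]
      · simp [pvGo, beq_eq_false_iff_ne.mpr hr, beq_eq_false_iff_ne.mpr ha, ih]
        by_cases hA : (t.any fun h => h.2.2.2.2 == "alt") = true <;> simp_all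

lemma pv_go_some_alt (l : List (Int × Int × Int × Int × String)) :
    pvGo l (some "alt")
      = if l.any (fun h => h.2.2.2.2 == "ref") then "ambiguous" else "alt" := by
  induction l with
  | nil => simp [pvGo]
  | cons h t ih =>
    by_cases hr : h.2.2.2.2 = "ref"
    · simp [pvGo, hr]
    · by_cases ha : h.2.2.2.2 = "alt"
      · simp [pvGo, ha, ih]
        by_cases hA : (t.any fun h => h.2.2.2.2 == "ref") = true <;> simp_all
      · simp [pvGo, beq_eq_false_iff_ne.mpr hr, beq_eq_false_iff_ne.mpr ha, ih]
        by_cases hA : (t.any fun h => h.2.2.2.2 == "ref") = true <;> simp_all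

lemma pv_go_none (l : List (Int × Int × Int × Int × String)) :
    pvGo l none
      = if l.any (fun h => h.2.2.2.2 == "ref") then
          (if l.any (fun h => h.2.2.2.2 == "alt") then "ambiguous" else "ref")
        else if l.any (fun h => h.2.2.2.2 == "alt") then "alt" else "ambiguous" := by
  induction l with
  | nil => simp [pvGo]
  | cons h t ih =>
    by_cases hr : h.2.2.2.2 = "ref"
    · simp [pvGo, hr, pv_go_some_ref]
      by_cases hA : (t.any fun h => h.2.2.2.2 == "alt") = true <;> simp_all
    · by_cases ha : h.2.2.2.2 = "alt"
      · simp [pvGo, ha, pv_go_some_alt]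
        by_cases hA : (t.any fun h => h.2.2.2.2 == "ref") = true <;> simp_all
      · simp [pvGo, beq_eq_false_iff_ne.mpr hr, beq_eq_false_iff_ne.mpr ha, ih]
        by_cases h1 : (t.any fun h => h.2.2.2.2 == "ref") = true <;>
          by_cases h2 : (t.any fun h => h.2.2.2.2 == "alt") = true <;> simp_all

lemma pv_foldl_add_const {x : String} (l : List String) (h : ∀ a ∈ l, a = x) :
    l.foldl PySem.Set.add [x] = [x] := by
  induction l with
  | nil => rfl
  | cons a t ih =>
    have hax := h a (by simp)
    simp only [List.foldl_cons, hax]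
    have : PySem.Set.add [x] x = [x] := by
      simp [PySem.Set.add, PySem.Set.contains]
    rw [this]
    exact ih (fun a ha => h a (by simp [ha]))

lemma pv_ofList_const {x : String} (l : List String) (hne : l ≠ [])
    (h : ∀ a ∈ l, a = x) : PySem.Set.ofList l = [x] := by
  cases l with
  | nil => exact absurd rfl hne
  | cons a t =>
    have hax := h a (by simp)
    rw [PySem.Set.ofList_eq_foldl]
    simp only [List.foldl_cons, hax]
    have : PySem.Set.add [] x = [x] := by simp [PySem.Set.add, PySem.Set.contains]
    rw [this]
    exact pv_foldl_add_const t (fun a ha => h a (by simp [ha]))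

-- ===== VERDICT (by name: the statement is the Claim_ definition above) =====
theorem classify_read_spec : Claim_equal_classify_read := by
  intro l _
  show classify_read l = classify_read_alt l
  unfold classify_read classify_read_alt
  by_cases hnil : l = []
  · simp [hnil]
  · simp only [hnil, if_false, pv_go_none]
    set informative := (l.map (fun h => h.2.2.2.2)).filter (fun a => a == "ref" || a == "alt") with hinf
    by_cases hR : l.any (fun h => h.2.2.2.2 == "ref") = true
    · obtain ⟨hr, hrl, hre⟩ := List.any_eq_true.mp hR
      have hre' : hr.2.2.2.2 = "ref" := by simpa using hre
      have hmem : ("ref" : String) ∈ informative := by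
        rw [hinf]
        refine List.mem_filter.mpr ⟨?_, by decide⟩
        exact List.mem_map.mpr ⟨hr, hrl, hre'⟩
      have hne : informative ≠ [] := fun he => by simp [he] at hmem
      by_cases hA : l.any (fun h => h.2.2.2.2 == "alt") = true
      · obtain ⟨ha, hal, hae⟩ := List.any_eq_true.mp hA
        have hae' : ha.2.2.2.2 = "alt" := by simpa using hae
        have hmema : ("alt" : String) ∈ informative := by
          rw [hinf]
          refine List.mem_filter.mpr ⟨?_, by decide⟩
          exact List.mem_map.mpr ⟨ha, hal, hae'⟩
        have hlen : (PySem.Set.ofList informative).length ≠ 1 := by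
          intro h1
          obtain ⟨y, hy⟩ := List.length_eq_one_iff.mp h1
          have h1m : ("ref" : String) ∈ PySem.Set.ofList informative :=
            (PySem.Set.mem_ofList _ _).mpr hmem
          have h2m : ("alt" : String) ∈ PySem.Set.ofList informative :=
            (PySem.Set.mem_ofList _ _).mpr hmema
          rw [hy] at h1m h2m
          simp at h1m h2m
          exact absurd (h1m.trans h2m.symm) (by decide)
        simp [hne, hR, hA, hlen]
      · have hall : ∀ a ∈ informative, a = "ref" := by
          intro a hai
          rw [hinf] at hai
          obtain ⟨ham, hap⟩ := List.mem_filter.mp hai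
          obtain ⟨h', h'l, h'e⟩ := List.mem_map.mp ham
          rcases (by simpa using hap : a = "ref" ∨ a = "alt") with h | h
          · exact h
          · exact absurd (List.any_eq_true.mpr ⟨h', h'l, by simp [h'e, h]⟩) hA
        have hof : PySem.Set.ofList informative = ["ref"] :=
          pv_ofList_const informative hne hall
        have hhd : informative.head?.getD "" = "ref" := by
          cases hi : informative with
          | nil => exact absurd hi hne
          | cons a t => simp [hall a (by simp [hi])]
        simp [hne, hR, hA, hof, hhd]
    · by_cases hA : l.any (fun h => h.2.2.2.2 == "alt") = true
      · obtain ⟨ha, hal, hae⟩ := List.any_eq_true.mp hA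
        have hae' : ha.2.2.2.2 = "alt" := by simpa using hae
        have hmem : ("alt" : String) ∈ informative := by
          rw [hinf]
          refine List.mem_filter.mpr ⟨?_, by decide⟩
          exact List.mem_map.mpr ⟨ha, hal, hae'⟩
        have hne : informative ≠ [] := fun he => by simp [he] at hmem
        have hall : ∀ a ∈ informative, a = "alt" := by
          intro a hai
          rw [hinf] at hai
          obtain ⟨ham, hap⟩ := List.mem_filter.mp hai
          obtain ⟨h', h'l, h'e⟩ := List.mem_map.mp ham
          rcases (by simpa using hap : a = "ref" ∨ a = "alt") with h | h
          · exact absurd (List.any_eq_true.mpr ⟨h', h'l, by simp [h'e, h]⟩) hR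
          · exact h
        have hof : PySem.Set.ofList informative = ["alt"] :=
          pv_ofList_const informative hne hall
        have hhd : informative.head?.getD "" = "alt" := by
          cases hi : informative with
          | nil => exact absurd hi hne
          | cons a t => simp [hall a (by simp [hi])]
        simp [hne, hR, hA, hof, hhd]
      · have hemp : informative = [] := by
          rw [hinf, List.filter_eq_nil_iff]
          intro a ham hap
          obtain ⟨h', h'l, h'e⟩ := List.mem_map.mp ham
          rcases (by simpa using hap : a = "ref" ∨ a = "alt") with h | h
          · exact hR (List.any_eq_true.mpr ⟨h', h'l, by simp [h'e, h]⟩)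
          · exact hA (List.any_eq_true.mpr ⟨h', h'l, by simp [h'e, h]⟩)
        simp [hemp, hR, hA]
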